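-- pv_equiv track=rewrite | github.com/estnltk/pfe | pypfe/ner.py | local_context_features
-- ===== SOURCE A (Python) =====
-- def local_context_features(name, series, sentence_starts, radius=2):
--     '''Generate simple local context features.
--     name            - the name of the feature
--     series          - the datalist to generate the features for.
--     sentence_starts - boolean list denoting starting positions of sentences
--     radius          - how many positions before and after the token to use.
--     '''
--     series = list(series)
--     assert (len(series) == len(sentence_starts))
--     n = len(series)
--     features = [[] for _ in range(n)]
--     for i in range(n):
--         j = i
--         while not sentence_starts[j] and j > 0 and i - j < radius:
--             j = j - 1
--         while j < n:
--             s = u'{0}[{1}]={2}'.format(name, j - i, series[j])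
--             features[i].append(s)
--             j = j + 1
--             if j == n or sentence_starts[j] or j > i + radius:
--                 break
--     return features
-- ===== SOURCE B (Python) =====
-- def local_context_features(name, series, sentence_starts, radius=2):
--     '''Generate simple local context features (index-then-clamp rewrite).'''
--     series = list(series)
--     assert (len(series) == len(sentence_starts))
--     n = len(series)
--     # one linear pass: prev[i] = last sentence start at or before i (-1 if none)
--     prev = []
--     last = -1
--     for k in range(n):
--         if sentence_starts[k]:
--             last = k
--         prev.append(last)
--     # one linear pass: nxt[i] = first sentence start strictly after i (n if none)
--     nxt = [n] * n
--     last = n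
--     for k in range(n - 1, -1, -1):
--         nxt[k] = last
--         if sentence_starts[k]:
--             last = k
--     features = []
--     for i in range(n):
--         left = min(i, max(0, i - radius, prev[i]))
--         right = min(n - 1, nxt[i] - 1, max(left, i + radius))
--         features.append([u'{0}[{1}]={2}'.format(name, j - i, series[j])
--                          for j in range(left, right + 1)])
--     return features
-- ===== Notes on version B (the rewrite author's own statement) =====
-- stated objective: alternative
-- what changed: B precomputes in two linear passes, for each position, the last sentence start at or before it and the first sentence start after it, then derives every token's feature window by arithmetic clamping (min/max) over these indices, instead of A's per-token backward/forward pointer scans.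
import Mathlib
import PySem

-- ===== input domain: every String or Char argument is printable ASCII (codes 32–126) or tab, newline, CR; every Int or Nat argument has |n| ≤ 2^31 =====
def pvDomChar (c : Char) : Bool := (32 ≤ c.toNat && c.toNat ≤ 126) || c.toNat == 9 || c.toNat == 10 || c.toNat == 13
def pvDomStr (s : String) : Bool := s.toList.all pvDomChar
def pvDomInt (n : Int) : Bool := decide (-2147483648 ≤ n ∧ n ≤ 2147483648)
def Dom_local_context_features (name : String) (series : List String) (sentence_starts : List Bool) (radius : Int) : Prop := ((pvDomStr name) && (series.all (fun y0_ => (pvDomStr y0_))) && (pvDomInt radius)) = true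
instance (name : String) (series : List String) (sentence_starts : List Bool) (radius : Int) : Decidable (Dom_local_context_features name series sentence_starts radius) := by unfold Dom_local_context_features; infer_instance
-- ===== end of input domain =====

-- B replaces A's per-token backward/forward pointer scans by two precomputed
-- sentence-boundary index arrays plus arithmetic clamping (alternative algorithm, same results).

-- the u'{0}[{1}]={2}'.format(name, off, x) string, shared by both Pythons verbatim
def pvFmt (name : String) (off : Int) (x : String) : String :=
  name ++ "[" ++ PySem.Int.toStr off ++ "]=" ++ x

-- ===== PORT A =====
-- first inner while loop: scan backwards for a sentence start / 0 / radius bound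
def aBack (ss : List Bool) (i : Nat) (radius : Int) (j : Nat) : Nat :=
  if h : ss.getD j false = false ∧ 0 < j ∧ (i : Int) - (j : Int) < radius then
    aBack ss i radius (j - 1)
  else j
termination_by j
decreasing_by omega

-- second inner while loop: emit features forward until boundary / end / radius
def aFwd (name : String) (series : List String) (ss : List Bool) (n i : Nat)
    (radius : Int) (j : Nat) (acc : List String) : List String :=
  if hj : j < n then
    let acc' := acc ++ [pvFmt name ((j : Int) - (i : Int)) (series.getD j "")]
    if j + 1 = n ∨ ss.getD (j + 1) false = true ∨ ((j : Int) + 1 > (i : Int) + radius) then acc'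
    else aFwd name series ss n i radius (j + 1) acc'
  else acc
termination_by n - j
decreasing_by omega

def local_context_features (name : String) (series : List String) (sentence_starts : List Bool) (radius : Int) : List (List String) :=
  let n := series.length
  (List.range n).map (fun i => aFwd name series sentence_starts n i radius (aBack sentence_starts i radius i) [])

-- ===== PORT B =====
-- forward pass: prev[k] = last sentence start at or before k (-1 if none)
def bPrevAux : List Bool → Int → Int → List Int
  | [], _, _ => []
  | s :: rest, k, last =>
    let last' := if s then k else last
    last' :: bPrevAux rest (k + 1) last'

-- backward pass: nxt[k] = first sentence start strictly after k (n if none);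
-- returns (nxt list for the suffix, first sentence-start index at or after k)
def bNextGo (n : Int) : List Bool → Int → List Int × Int
  | [], _ => ([], n)
  | s :: rest, k =>
    let p := bNextGo n rest (k + 1)
    (p.2 :: p.1, if s then k else p.2)

def local_context_features_alt (name : String) (series : List String) (sentence_starts : List Bool) (radius : Int) : List (List String) :=
  let n : Int := series.length
  let prev := bPrevAux sentence_starts 0 (-1)
  let nxt := (bNextGo n sentence_starts 0).1
  (List.range series.length).map (fun (i : Nat) =>
    let left : Int := min (i : Int) (max 0 (max ((i : Int) - radius) (prev.getD i (-1))))
    let right : Int := min (n - 1) (min (nxt.getD i n - 1) (max left ((i : Int) + radius)))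
    (PySem.List.pyRange left (right + 1) 1).map
      (fun j => pvFmt name (j - (i : Int)) (series.getD j.toNat "")))

-- ===== PRECONDITION & SPEC =====
-- Pre_ excludes exactly the inputs on which A's assert raises AssertionError (length mismatch)
def Pre_local_context_features (name : String) (series : List String) (sentence_starts : List Bool) (radius : Int) : Prop :=
  series.length = sentence_starts.length
instance (name : String) (series : List String) (sentence_starts : List Bool) (radius : Int) : Decidable (Pre_local_context_features name series sentence_starts radius) := by unfold Pre_local_context_features; infer_instance

def pvWitness_local_context_features : String × List String × List Bool × Int :=
  ("w", ["a", "b", "c", "d"], [true, false, true, false], 2)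

def Spec_local_context_features (name : String) (series : List String) (sentence_starts : List Bool) (radius : Int) (out : List (List String)) : Prop := out = local_context_features_alt name series sentence_starts radius
instance (name : String) (series : List String) (sentence_starts : List Bool) (radius : Int) (out : List (List String)) : Decidable (Spec_local_context_features name series sentence_starts radius out) := by unfold Spec_local_context_features; infer_instance

-- ===== CLAIM (what is proved, stated in full; the proofs are below) =====
def Claim_equal_local_context_features : Prop := ∀ (name : String) (series : List String) (sentence_starts : List Bool) (radius : Int), Dom_local_context_features name series sentence_starts radius → Pre_local_context_features name series sentence_starts radius → Spec_local_context_features name series sentence_starts radius (local_context_features name series sentence_starts radius)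

-- ===== LEMMAS AND PROOFS =====

-- spec-side description of B's prev pass: pvPre ss k last m = position (offset from k)
-- of the last sentence start at or before local index m, else last
def pvPre : List Bool → Int → Int → Nat → Int
  | [], _, last, _ => last
  | s :: _, k, last, 0 => if s then k else last
  | s :: rest, k, last, m + 1 => pvPre rest (k + 1) (if s then k else last) m

-- spec-side description of B's nxt pass
def pvNxt (n : Int) : List Bool → Int → Int
  | [], _ => n
  | s :: rest, k => if s then k else pvNxt n rest (k + 1)

def pvNS (ss : List Bool) (n : Int) (j : Nat) : Int :=
  pvNxt n (ss.drop (j + 1)) ((j : Int) + 1)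

theorem pvPre_zero (ss : List Bool) (k last : Int) :
    pvPre ss k last 0 = if ss.getD 0 false then k else last := by
  cases ss <;> simp [pvPre]

theorem pvPre_succ (ss : List Bool) (k last : Int) (m : Nat) :
    pvPre ss k last (m + 1) =
      if ss.getD (m + 1) false then k + ((m : Int) + 1) else pvPre ss k last m := by
  induction ss generalizing k last m with
  | nil => simp [pvPre]
  | cons s rest ih =>
    cases m with
    | zero =>
      simp only [pvPre, pvPre_zero, List.getD_cons_succ]
      by_cases hr : rest.getD 0 false = true
      · rw [if_pos hr, if_pos hr]; push_cast; ring
      · rw [if_neg hr, if_neg hr]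
    | succ m' =>
      simp only [pvPre, ih, List.getD_cons_succ]
      by_cases hr : rest.getD (m' + 1) false = true
      · rw [if_pos hr, if_pos hr]; push_cast; ring
      · rw [if_neg hr, if_neg hr]

theorem pvPre_le (ss : List Bool) (m : Nat) : pvPre ss 0 (-1) m ≤ (m : Int) := by
  induction m with
  | zero => rw [pvPre_zero]; split <;> omega
  | succ m ih =>
    rw [pvPre_succ]
    split
    · omega
    · push_cast; omega

theorem pvPre_ge_of_true (ss : List Bool) (k : Nat) (hk : ss.getD k false = true) :
    ∀ m, k ≤ m → (k : Int) ≤ pvPre ss 0 (-1) m := by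
  intro m
  induction m with
  | zero =>
    intro h
    interval_cases k
    rw [pvPre_zero, hk]; simp
  | succ m ih =>
    intro h
    rw [pvPre_succ]
    rcases Nat.eq_or_lt_of_le h with he | hl
    · subst he
      rw [if_pos hk]
      omega
    · have := ih (by omega)
      split
      · omega
      · exact this

theorem getD_true_lt_length (ss : List Bool) (m : Nat) (h : ss.getD m false = true) :
    m < ss.length := by
  by_contra hc
  rw [List.getD_eq_default ss false (by omega)] at h
  exact Bool.false_ne_true h

theorem pvNS_step (ss : List Bool) (n : Int) (j : Nat) (hj : j + 1 < ss.length) :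
    pvNS ss n j = if ss.getD (j + 1) false then ((j : Int) + 1) else pvNS ss n (j + 1) := by
  unfold pvNS
  rw [List.drop_eq_getElem_cons hj]
  simp only [pvNxt, List.getD_eq_getElem?_getD, List.getElem?_eq_getElem hj]
  norm_num

theorem pvNxt_ge (xs : List Bool) (n k : Int) : min n k ≤ pvNxt n xs k := by
  induction xs generalizing k with
  | nil => simp [pvNxt]
  | cons s rest ih =>
    simp only [pvNxt]
    split
    · omega
    · have := ih (k + 1); omega

theorem pvNS_gt (ss : List Bool) (n : Int) (j : Nat) (hn : (j : Int) + 1 ≤ n) :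
    (j : Int) + 1 ≤ pvNS ss n j := by
  have := pvNxt_ge (ss.drop (j + 1)) n ((j : Int) + 1)
  unfold pvNS
  omega

-- B's prev list agrees with pvPre
theorem bPrevAux_getD (ss : List Bool) :
    ∀ (k last : Int) (i : Nat), i < ss.length →
      (bPrevAux ss k last).getD i (-1) = pvPre ss k last i := by
  induction ss with
  | nil => intro _ _ i h; simp at h
  | cons s rest ih =>
    intro k last i h
    cases i with
    | zero => simp [bPrevAux, pvPre]
    | succ i' =>
      simp only [bPrevAux, pvPre, List.getD_cons_succ]
      exact ih _ _ i' (by simpa using h)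

-- B's nxt list agrees with pvNxt on the corresponding suffix
theorem bNextGo_snd (ss : List Bool) (n : Int) :
    ∀ k, (bNextGo n ss k).2 = pvNxt n ss k := by
  induction ss with
  | nil => intro k; rfl
  | cons s rest ih => intro k; simp [bNextGo, pvNxt, ih]

theorem bNextGo_getD (ss : List Bool) (n : Int) :
    ∀ (k : Int) (i : Nat), i < ss.length →
      ((bNextGo n ss k).1).getD i n = pvNxt n (ss.drop (i + 1)) (k + (i : Int) + 1) := by
  induction ss with
  | nil => intro _ i h; simp at h
  | cons s rest ih =>
    intro k i h
    cases i with
    | zero => simp [bNextGo, bNextGo_snd]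
    | succ i' =>
      simp only [bNextGo, List.getD_cons_succ, List.drop_succ_cons]
      rw [ih (k + 1) i' (by simpa using h)]
      congr 1
      push_cast; ring

-- the backward while loop computes the clamped left bound
theorem aBack_eq (ss : List Bool) (i : Nat) (radius : Int) :
    ∀ j : Nat, (aBack ss i radius j : Int) =
      min (j : Int) (max 0 (max ((i : Int) - radius) (pvPre ss 0 (-1) j))) := by
  intro j
  induction j with
  | zero =>
    rw [aBack]
    have h0 : ¬ (ss.getD 0 false = false ∧ 0 < 0 ∧ (i : Int) - (0 : Nat) < radius) := by
      intro ⟨_, h, _⟩; omega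
    rw [dif_neg h0]
    have := pvPre_le ss 0
    omega
  | succ m ih =>
    rw [aBack]
    split
    · rename_i h
      obtain ⟨hss, _, hr⟩ := h
      have hstep := pvPre_succ ss 0 (-1) m
      rw [hss] at hstep
      simp only [if_false, Bool.false_eq_true] at hstep
      simp only [Nat.add_sub_cancel, ih, hstep]
      have hle := pvPre_le ss m
      push_cast at hr ⊢
      omega
    · rename_i h
      push_neg at h
      have hle := pvPre_le ss (m + 1)
      rcases hss : ss.getD (m + 1) false with _ | _
      · -- sentence_starts[m+1] = false: loop stopped because i - j ≥ radius
        have hr : radius ≤ (i : Int) - ((m : Int) + 1) := by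
          have := h hss
          push_cast at this ⊢
          omega
        push_cast
        omega
      · -- sentence_starts[m+1] = true
        have := pvPre_succ ss 0 (-1) m
        rw [hss] at this
        simp only [if_true] at this
        push_cast
        omega

-- right bound reached by the forward loop starting at j
def pvR (ss : List Bool) (n i : Nat) (radius : Int) (j : Nat) : Int :=
  min ((n : Int) - 1) (min (pvNS ss (n : Int) j - 1) (max (j : Int) ((i : Int) + radius)))

-- the forward while loop emits exactly the features for indices j..pvR j
theorem aFwd_eq (name : String) (series : List String) (ss : List Bool) (n i : Nat)
    (radius : Int) (hn : n = ss.length) :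
    ∀ (d j : Nat) (acc : List String), j < n → n - j = d →
      aFwd name series ss n i radius j acc =
        acc ++ (List.range (pvR ss n i radius j + 1 - (j : Int)).toNat).map
          (fun t => pvFmt name (((j + t : Nat) : Int) - (i : Int)) (series.getD (j + t) "")) := by
  intro d
  induction d with
  | zero => intro j acc hj hd; omega
  | succ d ih =>
    intro j acc hj hd
    rw [aFwd, dif_pos hj]
    have hNSgt : (j : Int) + 1 ≤ pvNS ss n j := pvNS_gt ss n j (by omega)
    split
    · -- break: the emitted index j is the right bound
      rename_i hbr
      have hR : pvR ss n i radius j = (j : Int) := by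
        unfold pvR
        rcases hbr with h1 | h2 | h3
        · have : (n : Int) - 1 = (j : Int) := by omega
          omega
        · have hlt := getD_true_lt_length ss (j + 1) h2
          rw [pvNS_step ss n j hlt, h2] at hNSgt ⊢
          simp only [if_true]
          omega
        · omega
      rw [hR]
      simp
    · rename_i hbr
      push_neg at hbr
      obtain ⟨hne, hssf, hrad⟩ := hbr
      have hjn : j + 1 < n := by omega
      have hssf' : ss.getD (j + 1) false = false := by simpa using hssf
      have hNSeq : pvNS ss n j = pvNS ss n (j + 1) := by
        rw [pvNS_step ss n j (by omega), hssf']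
        simp
      have hReq : pvR ss n i radius j = pvR ss n i radius (j + 1) := by
        unfold pvR
        rw [hNSeq]
        push_cast
        omega
      have hNSgt' : ((j : Int) + 1) + 1 ≤ pvNS ss n (j + 1) := by
        have := pvNS_gt ss n (j + 1) (by push_cast; omega)
        push_cast at this ⊢
        omega
      have hRge : (j : Int) + 1 ≤ pvR ss n i radius j := by
        rw [hReq]
        unfold pvR
        push_cast at hrad hNSgt' ⊢
        omega
      rw [ih (j + 1) _ hjn (by omega)]
      have hcnt : (pvR ss n i radius j + 1 - (j : Int)).toNat =
          (pvR ss n i radius (j + 1) + 1 - ((j + 1 : Nat) : Int)).toNat + 1 := by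
        rw [hReq] at hRge ⊢
        push_cast at hRge ⊢
        omega
      rw [hcnt]
      have hmaps : List.map (fun t => pvFmt name (((j + t : Nat) : Int) - (i : Int)) (series.getD (j + t) ""))
            (List.range ((pvR ss n i radius (j + 1) + 1 - ((j + 1 : Nat) : Int)).toNat + 1)) =
          pvFmt name ((j : Int) - (i : Int)) (series.getD j "") ::
            List.map (fun t => pvFmt name (((j + 1 + t : Nat) : Int) - (i : Int)) (series.getD (j + 1 + t) ""))
              (List.range ((pvR ss n i radius (j + 1) + 1 - ((j + 1 : Nat) : Int)).toNat)) := by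
        rw [List.range_succ_eq_map, List.map_cons, List.map_map]
        refine List.cons_eq_cons.mpr ⟨by norm_num, ?_⟩
        apply List.map_congr_left
        intro t _
        simp only [Function.comp]
        have h1 : j + 1 + t = j + (t + 1) := by omega
        rw [h1]
      rw [hmaps, List.append_assoc, List.singleton_append]

-- if a sentence start exists at or before i, pvPre finds one at least that large;
-- hence there is no sentence start strictly between the left bound and i
theorem no_start_between (ss : List Bool) (i : Nat) (radius : Int) (L : Int)
    (hL : L = min (i : Int) (max 0 (max ((i : Int) - radius) (pvPre ss 0 (-1) i)))) :
    ∀ k : Nat, L < (k : Int) → k ≤ i → ss.getD k false = false := by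
  intro k hk hki
  by_contra hc
  have hc' : ss.getD k false = true := by
    cases h : ss.getD k false
    · exact absurd h hc
    · rfl
  have := pvPre_ge_of_true ss k hc' i hki
  have : (k : Int) ≤ L := by
    rw [hL]
    have : (k : Int) ≤ (i : Int) := by exact_mod_cast hki
    omega
  omega

theorem pvNS_skip (ss : List Bool) (n : Int) (i : Nat) (hi : i < ss.length) :
    ∀ (d j : Nat), j ≤ i → i - j = d →
      (∀ k : Nat, j < k → k ≤ i → ss.getD k false = false) →
      pvNS ss n j = pvNS ss n i := by
  intro d
  induction d with
  | zero => intro j h1 h2 _; have : j = i := by omega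
            subst this; rfl
  | succ d ih =>
    intro j h1 h2 hno
    have hji : j < i := by omega
    rw [pvNS_step ss n j (by omega), hno (j + 1) (by omega) (by omega)]
    simp only [Bool.false_eq_true, if_false]
    exact ih (j + 1) (by omega) (by omega) (fun k hk1 hk2 => hno k (by omega) hk2)

-- ===== VERDICT (by name: the statement is the Claim_ definition above) =====
theorem local_context_features_spec : Claim_equal_local_context_features := by
  intro name series ss radius _ hpre
  unfold Spec_local_context_features local_context_features local_context_features_alt
  unfold Pre_local_context_features at hpre
  apply List.map_congr_left
  intro i hi
  rw [List.mem_range] at hi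
  set n : Nat := series.length with hn
  have hnss : n = ss.length := hpre
  -- B's table lookups
  rw [bPrevAux_getD ss 0 (-1) i (by omega)]
  rw [bNextGo_getD ss (n : Int) 0 i (by omega)]
  have hnxt : pvNxt (n : Int) (ss.drop (i + 1)) (0 + (i : Int) + 1) = pvNS ss (n : Int) i := by
    unfold pvNS; congr 1; ring
  rw [hnxt]
  -- A's left bound
  set L : Int := min (i : Int) (max 0 (max ((i : Int) - radius) (pvPre ss 0 (-1) i))) with hLdef
  have hback : (aBack ss i radius i : Int) = L := aBack_eq ss i radius i
  have hL0 : 0 ≤ L := by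
    have : (0 : Int) ≤ (i : Int) := by positivity
    simp only [hLdef]; omega
  have hLi : L ≤ (i : Int) := by simp only [hLdef]; omega
  set Ln : Nat := aBack ss i radius i with hLn
  have hLcast : (Ln : Int) = L := hback
  have hLlt : Ln < n := by omega
  -- the forward loop from Ln
  rw [aFwd_eq name series ss n i radius hnss (n - Ln) Ln [] hLlt rfl]
  -- identify A's right bound with B's
  have hnostart := no_start_between ss i radius L hLdef
  have hNS : pvNS ss (n : Int) Ln = pvNS ss (n : Int) i := by
    apply pvNS_skip ss (n : Int) i (by omega) (i - Ln) Ln (by omega) rfl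
    intro k hk1 hk2
    exact hnostart k (by omega) hk2
  have hmaxL : max (Ln : Int) ((i : Int) + radius) = max L ((i : Int) + radius) := by
    rw [hLcast]
  have hReq : pvR ss n i radius Ln =
      min ((n : Int) - 1) (min (pvNS ss (n : Int) i - 1) (max L ((i : Int) + radius))) := by
    unfold pvR
    rw [hNS, hmaxL]
  rw [List.nil_append, hReq]
  -- bring B's comprehension to List.range form
  simp only [PySem.List.pyRange_one, List.map_map]
  set R : Int := min ((n : Int) - 1) (min (pvNS ss (n : Int) i - 1) (max L ((i : Int) + radius))) with hRdef
  have : R + 1 - (Ln : Int) = R + 1 - L := by rw [hLcast]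
  rw [this]
  apply List.map_congr_left
  intro t ht
  rw [List.mem_range] at ht
  simp only [Function.comp]
  congr 2
  · rw [← hLcast]; push_cast; ring
  · rw [← hLcast]
    push_cast
    omega
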